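-- pv_equiv track=rewrite | github.com/esakat/leetcode-python | 245.shortest-word-distance-iii.py | shortestSameWordDistance
-- ===== SOURCE A (Python) =====
-- from typing import List
--
-- def shortestSameWordDistance(wordsDict: List[str], word: str) -> int:
--     wordIndecies = []
--     for i, w in enumerate(wordsDict):
--         if w == word:
--             wordIndecies.append(i)
--
--     shortestPath = 10000000
--     for i in range(len(wordIndecies)-1):
--         shortestPath = min(shortestPath, wordIndecies[i+1]-wordIndecies[i])
--
--     return shortestPath
-- ===== SOURCE B (Python) =====
-- from typing import List
--
-- def shortestSameWordDistance(wordsDict: List[str], word: str) -> int: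
--     prev = -1
--     shortest = 10000000
--     for i, w in enumerate(wordsDict):
--         if w == word:
--             if prev >= 0:
--                 shortest = min(shortest, i - prev)
--             prev = i
--     return shortest
-- ===== Notes on version B (the rewrite author's own statement) =====
-- stated objective: simpler
-- what changed: Replaces the two-pass approach (collect all occurrence indices into a list, then scan consecutive pairs by index) with a single streaming pass that keeps only the previous occurrence index and the running minimum.
import Mathlib
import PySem

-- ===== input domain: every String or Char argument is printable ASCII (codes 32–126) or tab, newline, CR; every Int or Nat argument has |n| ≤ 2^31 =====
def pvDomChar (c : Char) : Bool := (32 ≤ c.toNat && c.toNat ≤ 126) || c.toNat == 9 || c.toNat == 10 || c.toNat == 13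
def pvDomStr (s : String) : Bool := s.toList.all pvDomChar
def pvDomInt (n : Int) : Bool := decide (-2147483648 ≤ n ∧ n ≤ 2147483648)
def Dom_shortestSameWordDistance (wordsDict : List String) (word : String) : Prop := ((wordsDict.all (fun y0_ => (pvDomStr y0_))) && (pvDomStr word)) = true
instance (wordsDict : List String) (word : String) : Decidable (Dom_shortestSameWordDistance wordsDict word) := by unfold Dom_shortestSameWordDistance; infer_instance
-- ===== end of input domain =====

-- B: single streaming pass keeping only the previous occurrence index and the running
-- minimum, instead of A's two passes (collect index list, then scan consecutive pairs).


-- ===== PORT A =====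
-- literal port: first loop collects occurrence indices; second loop scans range(len-1),
-- indexing with pyGetD (default 0 is unreachable: every index accessed is in range).
def shortestSameWordDistance (wordsDict : List String) (word : String) : Int :=
  let wordIndecies : List Int :=
    (PySem.List.enumerate wordsDict 0).foldl
      (fun acc p => if p.2 == word then acc ++ [p.1] else acc) []
  (PySem.List.pyRange 0 ((wordIndecies.length : Int) - 1) 1).foldl
    (fun s i => min s (PySem.List.pyGetD wordIndecies (i + 1) 0 -
                       PySem.List.pyGetD wordIndecies i 0))
    10000000

-- ===== PORT B =====
-- literal port of Source B: one fold over enumerate with state (prev, shortest).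
def shortestSameWordDistance_alt (wordsDict : List String) (word : String) : Int :=
  ((PySem.List.enumerate wordsDict 0).foldl
    (fun st p => if p.2 == word then
        (p.1, if st.1 ≥ 0 then min st.2 (p.1 - st.1) else st.2)
      else st)
    (-1, 10000000)).2

-- ===== PRECONDITION & SPEC =====
def Spec_shortestSameWordDistance (wordsDict : List String) (word : String) (out : Int) : Prop := out = shortestSameWordDistance_alt wordsDict word
instance (wordsDict : List String) (word : String) (out : Int) : Decidable (Spec_shortestSameWordDistance wordsDict word out) := by unfold Spec_shortestSameWordDistance; infer_instance

-- ===== CLAIM (what is proved, stated in full; the proofs are below) =====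
def Claim_equal_shortestSameWordDistance : Prop := ∀ (wordsDict : List String) (word : String), Dom_shortestSameWordDistance wordsDict word → Spec_shortestSameWordDistance wordsDict word (shortestSameWordDistance wordsDict word)

-- ===== LEMMAS AND PROOFS =====

-- min over consecutive differences, with left-fold accumulator: the common value form.
def pairsMin : List Int → Int → Int
  | [], s => s
  | [_], s => s
  | a :: b :: rest, s => pairsMin (b :: rest) (min s (b - a))

-- B's step as a function on the occurrence-index list.
def bstep (st : Int × Int) (i : Int) : Int × Int :=
  (i, if st.1 ≥ 0 then min st.2 (i - st.1) else st.2)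

-- a fold that only acts on elements passing a test = a fold over the filtered-mapped list
lemma foldl_ite_filter_map {α β γ : Type} (c : α → Bool) (g : α → β)
    (f : γ → β → γ) (l : List α) (st : γ) :
    l.foldl (fun st p => if c p then f st (g p) else st) st
      = ((l.filter c).map g).foldl f st := by
  induction l generalizing st with
  | nil => rfl
  | cons x xs ih =>
    by_cases h : c x = true <;> simp [h, ih]

lemma bstep_fold_nonneg (idxs : List Int) (prev s : Int) (hp : 0 ≤ prev)
    (hall : ∀ x ∈ idxs, 0 ≤ x) :
    (idxs.foldl bstep (prev, s)).2 = pairsMin (prev :: idxs) s := by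
  induction idxs generalizing prev s with
  | nil => simp [pairsMin]
  | cons i rest ih =>
    have hi : 0 ≤ i := hall i (by simp)
    have hrest : ∀ x ∈ rest, 0 ≤ x := fun x hx => hall x (by simp [hx])
    simp only [List.foldl_cons, pairsMin, bstep, ge_iff_le, if_pos hp]
    exact ih i (min s (i - prev)) hi hrest

lemma bstep_fold_init (idxs : List Int) (s : Int)
    (hall : ∀ x ∈ idxs, 0 ≤ x) :
    (idxs.foldl bstep (-1, s)).2 = pairsMin idxs s := by
  cases idxs with
  | nil => rfl
  | cons i rest =>
    have hi : 0 ≤ i := hall i (by simp)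
    have hrest : ∀ x ∈ rest, 0 ≤ x := fun x hx => hall x (by simp [hx])
    simp only [List.foldl_cons, bstep]
    rw [if_neg (by omega)]
    exact bstep_fold_nonneg rest i s hi hrest

-- A's second loop, on Nat-range form, equals pairsMin.
lemma range_fold_pairsMin (l : List Int) (s : Int) :
    (List.range (l.length - 1)).foldl
      (fun s k => min s (l.getD (k + 1) 0 - l.getD k 0)) s = pairsMin l s := by
  induction l generalizing s with
  | nil => rfl
  | cons a l ih =>
    cases l with
    | nil => rfl
    | cons b rest =>
      simp only [List.length_cons, Nat.add_sub_cancel, List.range_succ_eq_map,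
        List.foldl_cons, List.foldl_map, pairsMin]
      simp only [List.getD_cons_succ, List.getD_cons_zero]
      exact ih (min s (b - a))

-- A's pyRange/pyGetD loop equals pairsMin.
lemma pyrange_fold_pairsMin (l : List Int) (s : Int) :
    (PySem.List.pyRange 0 ((l.length : Int) - 1) 1).foldl
      (fun s i => min s (PySem.List.pyGetD l (i + 1) 0 - PySem.List.pyGetD l i 0)) s
      = pairsMin l s := by
  rw [PySem.List.pyRange_one]
  simp only [Int.sub_zero, zero_add]
  have hlen : ((l.length : Int) - 1).toNat = l.length - 1 := by omega
  rw [hlen, List.foldl_map]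
  have hcast : ∀ (s : Int) (k : Nat),
      min s (PySem.List.pyGetD l ((k : Int) + 1) 0 - PySem.List.pyGetD l (k : Int) 0)
        = min s (l.getD (k + 1) 0 - l.getD k 0) := by
    intro s k
    have h1 : ((k : Int) + 1) = ((k + 1 : Nat) : Int) := by push_cast; ring
    rw [h1, PySem.List.pyGetD_natCast, PySem.List.pyGetD_natCast]
  have heq : (List.range (l.length - 1)).foldl
      (fun s (k : Nat) => min s (PySem.List.pyGetD l ((k : Int) + 1) 0 - PySem.List.pyGetD l (k : Int) 0)) s
      = (List.range (l.length - 1)).foldl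
        (fun s k => min s (l.getD (k + 1) 0 - l.getD k 0)) s := by
    have hfun : (fun s (k : Nat) => min s (PySem.List.pyGetD l ((k : Int) + 1) 0 - PySem.List.pyGetD l (k : Int) 0))
        = (fun s k => min s (l.getD (k + 1) 0 - l.getD k 0)) := by
      funext s k; exact hcast s k
    rw [hfun]
  rw [heq]
  exact range_fold_pairsMin l s

-- every occurrence index (fst of enumerate from 0) is nonnegative
lemma enumerate_fst_nonneg (ws : List String) (word : String) :
    ∀ x ∈ (((PySem.List.enumerate ws 0).filter (fun p => p.2 == word)).map (·.1)),
      (0 : Int) ≤ x := by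
  intro x hx
  simp only [List.mem_map, List.mem_filter] at hx
  obtain ⟨p, ⟨hp, _⟩, rfl⟩ := hx
  rw [PySem.List.mem_enumerate_iff] at hp
  obtain ⟨k, hk, rfl⟩ := hp
  simp

-- ===== VERDICT (by name: the statement is the Claim_ definition above) =====
theorem shortestSameWordDistance_spec : Claim_equal_shortestSameWordDistance := by
  intro ws word _
  unfold Spec_shortestSameWordDistance shortestSameWordDistance shortestSameWordDistance_alt
  have hA := PySem.List.foldl_append_if (l := PySem.List.enumerate ws 0)
    (p := fun p => p.2 == word) (f := fun p => p.1) (acc := ([] : List Int))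
  simp only [hA, List.nil_append]
  set idxs := (((PySem.List.enumerate ws 0).filter (fun p => p.2 == word)).map (·.1)) with hidxs
  have hB : (PySem.List.enumerate ws 0).foldl
      (fun st p => if p.2 == word then
          (p.1, if st.1 ≥ 0 then min st.2 (p.1 - st.1) else st.2)
        else st) (-1, 10000000)
      = idxs.foldl bstep (-1, 10000000) := by
    rw [hidxs]
    exact foldl_ite_filter_map (fun p => p.2 == word) (·.1) bstep
      (PySem.List.enumerate ws 0) (-1, 10000000)
  rw [hB, bstep_fold_init idxs 10000000 (enumerate_fst_nonneg ws word),
    pyrange_fold_pairsMin idxs 10000000]
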